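-- pv_equiv track=rewrite | github.com/alxdofficial/tsfm | val_scripts/human_activity_recognition/visualization_3d.py | build_group_labels_text
-- ===== SOURCE A (Python) =====
-- from typing import Dict, List, Tuple
--
-- def build_group_labels_text(labels: List[str], label_to_group: Dict[str, str]) -> str:
--     """
--     Build a text showing which labels belong to which groups.
--     Only includes groups that are actually present in the data.
--     """
--     from collections import defaultdict
--
--     # Group labels by their group
--     group_to_labels = defaultdict(set)
--     for label in set(labels):
--         group = label_to_group.get(label, label)
--         group_to_labels[group].add(label)
--
--     # Build text, sorted by group name
--     lines = []
--     for group in sorted(group_to_labels.keys()):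
--         group_labels = sorted(group_to_labels[group])
--         # Show group and its member labels
--         if len(group_labels) == 1 and group_labels[0] == group:
--             # Single label that is its own group
--             lines.append(f"{group}")
--         else:
--             # Group with multiple labels or different name
--             labels_str = ', '.join(group_labels)
--             lines.append(f"{group}: {labels_str}")
--
--     return '\n'.join(lines)
-- ===== SOURCE B (Python) =====
-- def build_group_labels_text(labels, label_to_group):
--     """Dict-free rewrite: sort the unique labels once, then emit each sorted
--     group key with its members selected by a scan of the sorted labels."""
--     uniq = sorted(set(labels))
--     groups = sorted({label_to_group.get(l, l) for l in uniq})
--     lines = []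
--     for group in groups:
--         members = [l for l in uniq if label_to_group.get(l, l) == group]
--         if members == [group]:
--             lines.append(group)
--         else:
--             lines.append(f"{group}: {', '.join(members)}")
--     return '\n'.join(lines)
-- ===== Notes on version B (the rewrite author's own statement) =====
-- stated objective: simpler
-- what changed: A builds a defaultdict(set) index over the unique labels and then sorts the keys and each bucket; B drops the dict entirely: it sorts the unique labels once, sorts the set of group keys, and selects each group's members by filtering the already-sorted label list, with the single-label test written as members == [group].
import Mathlib
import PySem

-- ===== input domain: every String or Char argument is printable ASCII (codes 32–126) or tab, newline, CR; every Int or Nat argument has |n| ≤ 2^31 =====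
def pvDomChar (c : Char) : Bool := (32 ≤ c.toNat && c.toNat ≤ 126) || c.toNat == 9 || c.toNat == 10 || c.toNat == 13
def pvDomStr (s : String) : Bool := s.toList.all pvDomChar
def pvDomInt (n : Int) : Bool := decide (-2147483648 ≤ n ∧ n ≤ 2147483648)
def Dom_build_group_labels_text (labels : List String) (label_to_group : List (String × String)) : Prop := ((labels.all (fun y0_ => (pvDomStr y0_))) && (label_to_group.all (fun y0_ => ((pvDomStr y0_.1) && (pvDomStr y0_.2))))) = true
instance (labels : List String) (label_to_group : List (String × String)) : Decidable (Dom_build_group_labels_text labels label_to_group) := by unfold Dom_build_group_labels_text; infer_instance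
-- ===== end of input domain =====

-- B replaces A's defaultdict index by a single sort of the unique labels plus a
-- per-group filter scan of that sorted list (simpler: no dict, no inner sorts).

-- ===== PORT A =====
def build_group_labels_text (labels : List String) (label_to_group : List (String × String)) : String :=
  -- for label in set(labels): group_to_labels[label_to_group.get(label, label)].add(label)
  let group_to_labels : PySem.Dict String (PySem.Set String) :=
    (PySem.Set.ofList labels).foldl
      (fun d label =>
        PySem.Dict.modify d (PySem.Dict.getD (PySem.Dict.mk label_to_group) label label)
          PySem.Set.empty (fun s => PySem.Set.add s label))
      PySem.Dict.empty
  -- for group in sorted(group_to_labels.keys()): …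
  let lines : List String :=
    (PySem.List.sorted (PySem.Dict.keys group_to_labels) (fun x => x) false).foldl
      (fun lines group =>
        let group_labels :=
          PySem.List.sorted (PySem.Dict.getD group_to_labels group PySem.Set.empty) (fun x => x) false
        if group_labels.length == 1 && PySem.List.pyGetD group_labels 0 "" == group then
          lines ++ [group]
        else
          lines ++ [PySem.Str.join ": " [group, PySem.Str.join ", " group_labels]])
      []
  PySem.Str.join "\n" lines

-- ===== PORT B =====
def build_group_labels_text_alt (labels : List String) (label_to_group : List (String × String)) : String :=
  -- uniq = sorted(set(labels))
  let uniq := PySem.List.sorted (PySem.Set.ofList labels) (fun x => x) false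
  -- groups = sorted({label_to_group.get(l, l) for l in uniq})
  let groups :=
    PySem.List.sorted
      (PySem.Set.ofList (uniq.map (fun l => PySem.Dict.getD (PySem.Dict.mk label_to_group) l l)))
      (fun x => x) false
  let lines : List String :=
    groups.foldl
      (fun lines group =>
        let members := uniq.filter (fun l => PySem.Dict.getD (PySem.Dict.mk label_to_group) l l == group)
        if members == [group] then
          lines ++ [group]
        else
          lines ++ [PySem.Str.join ": " [group, PySem.Str.join ", " members]])
      []
  PySem.Str.join "\n" lines

-- ===== PRECONDITION & SPEC =====
def Spec_build_group_labels_text (labels : List String) (label_to_group : List (String × String)) (out : String) : Prop := out = build_group_labels_text_alt labels label_to_group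
instance (labels : List String) (label_to_group : List (String × String)) (out : String) : Decidable (Spec_build_group_labels_text labels label_to_group out) := by unfold Spec_build_group_labels_text; infer_instance

-- ===== CLAIM (what is proved, stated in full; the proofs are below) =====
def Claim_equal_build_group_labels_text : Prop := ∀ (labels : List String) (label_to_group : List (String × String)), Dom_build_group_labels_text labels label_to_group → Spec_build_group_labels_text labels label_to_group (build_group_labels_text labels label_to_group)

-- ===== LEMMAS AND PROOFS =====

-- A's dict-building loop: the bucket at key k collects, in processing order,
-- exactly the processed labels whose group is k (labels processed are distinct,
-- and none of them already sits in a bucket of d).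
theorem pv_bucket (g : String → String) (L : List String) (d : PySem.Dict String (PySem.Set String))
    (hL : L.Nodup)
    (hd : ∀ k l, l ∈ PySem.Dict.getD d k PySem.Set.empty → l ∉ L) (k : String) :
    PySem.Dict.getD
      (L.foldl (fun d l => PySem.Dict.modify d (g l) PySem.Set.empty (fun s => PySem.Set.add s l)) d)
      k PySem.Set.empty
    = PySem.Dict.getD d k PySem.Set.empty ++ L.filter (fun l => g l == k) := by
  induction L generalizing d with
  | nil => simp
  | cons l L ih =>
    have hlL : l ∉ L := (List.nodup_cons.mp hL).1
    have hnd : L.Nodup := (List.nodup_cons.mp hL).2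
    have hln : l ∉ PySem.Dict.getD d (g l) PySem.Set.empty := by
      intro hmem
      exact (hd (g l) l hmem) (List.mem_cons_self ..)
    have hadd : PySem.Set.add (PySem.Dict.getD d (g l) PySem.Set.empty) l
        = PySem.Dict.getD d (g l) PySem.Set.empty ++ [l] := by
      unfold PySem.Set.add
      rw [if_neg (by simpa [PySem.Set.contains_iff] using hln)]
    have hd' : ∀ k' l', l' ∈ PySem.Dict.getD
        (PySem.Dict.modify d (g l) PySem.Set.empty (fun s => PySem.Set.add s l)) k' PySem.Set.empty
        → l' ∉ L := by
      intro k' l' hmem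
      by_cases hk : k' = g l
      · subst hk
        rw [PySem.Dict.getD_modify_self, hadd] at hmem
        rcases List.mem_append.mp hmem with h | h
        · exact fun hc => hd _ _ h (List.mem_cons_of_mem _ hc)
        · simp at h; subst h; exact hlL
      · rw [PySem.Dict.getD_modify_of_ne _ _ _ hk] at hmem
        exact fun hc => hd _ _ hmem (List.mem_cons_of_mem _ hc)
    simp only [List.foldl_cons, List.filter_cons]
    rw [ih _ hnd hd']
    by_cases hk : g l = k
    · subst hk
      rw [PySem.Dict.getD_modify_self, hadd]
      simp
    · rw [PySem.Dict.getD_modify_of_ne _ _ _ (Ne.symm hk)]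
      simp [hk]

-- sorted (with identity key) commutes with filter
theorem pv_sorted_filter (xs : List String) (p : String → Bool) :
    PySem.List.sorted (xs.filter p) (fun x => x) false
    = (PySem.List.sorted xs (fun x => x) false).filter p := by
  apply PySem.List.sorted_id_eq_of_perm_of_pairwise
  · exact (PySem.List.sorted_perm xs (fun x => x) false).filter p
  · exact List.Pairwise.filter p (PySem.List.sorted_pairwise xs (fun x => x))

-- A's line test 'len(gl) == 1 and gl[0] == group' is the test 'gl == [group]'
theorem pv_cond (ms : List String) (group : String) :
    (ms.length == 1 && PySem.List.pyGetD ms 0 "" == group) = (ms == [group]) := by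
  match ms with
  | [] => simp
  | [x] => simp [PySem.List.pyGetD, PySem.List.pyIdx?, PySem.List.pyGet?]
  | x :: y :: t => simp

-- the whole equality, with the group lookup abstracted as g
theorem pv_main (g : String → String) (labels : List String) :
    (let group_to_labels : PySem.Dict String (PySem.Set String) :=
      (PySem.Set.ofList labels).foldl
        (fun d label => PySem.Dict.modify d (g label) PySem.Set.empty (fun s => PySem.Set.add s label))
        PySem.Dict.empty
     let lines : List String :=
      (PySem.List.sorted (PySem.Dict.keys group_to_labels) (fun x => x) false).foldl
        (fun lines group =>
          let group_labels :=
            PySem.List.sorted (PySem.Dict.getD group_to_labels group PySem.Set.empty) (fun x => x) false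
          if group_labels.length == 1 && PySem.List.pyGetD group_labels 0 "" == group then
            lines ++ [group]
          else
            lines ++ [PySem.Str.join ": " [group, PySem.Str.join ", " group_labels]])
        []
     PySem.Str.join "\n" lines)
    = (let uniq := PySem.List.sorted (PySem.Set.ofList labels) (fun x => x) false
       let groups := PySem.List.sorted (PySem.Set.ofList (uniq.map g)) (fun x => x) false
       let lines : List String :=
        groups.foldl
          (fun lines group =>
            let members := uniq.filter (fun l => g l == group)
            if members == [group] then
              lines ++ [group]
            else
              lines ++ [PySem.Str.join ": " [group, PySem.Str.join ", " members]])
          []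
       PySem.Str.join "\n" lines) := by
  have hbucket : ∀ k, PySem.Dict.getD
      ((PySem.Set.ofList labels).foldl
        (fun d label => PySem.Dict.modify d (g label) PySem.Set.empty (fun s => PySem.Set.add s label))
        PySem.Dict.empty) k PySem.Set.empty
      = (PySem.Set.ofList labels).filter (fun l => g l == k) := by
    intro k
    rw [pv_bucket g (PySem.Set.ofList labels) PySem.Dict.empty (PySem.Set.nodup_ofList labels)
      (by simp [PySem.Dict.getD_empty, PySem.Set.empty]) k]
    simp [PySem.Dict.getD_empty, PySem.Set.empty]
  have hkeys : (List.foldl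
        (fun d label => PySem.Dict.modify d (g label) PySem.Set.empty (fun s => PySem.Set.add s label))
        PySem.Dict.empty (PySem.Set.ofList labels)).keys
      = PySem.Set.ofList ((PySem.Set.ofList labels).map g) := by
    rw [PySem.Dict.keys_foldl_modify_key (PySem.Set.ofList labels) g PySem.Set.empty
      (fun d x => fun s => PySem.Set.add s x) PySem.Dict.empty]
    rw [PySem.Dict.keys_empty]
    exact PySem.Set.update_empty _
  have hgroups : PySem.List.sorted (PySem.Set.ofList ((PySem.Set.ofList labels).map g)) (fun x => x) false
      = PySem.List.sorted
          (PySem.Set.ofList ((PySem.List.sorted (PySem.Set.ofList labels) (fun x => x) false).map g))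
          (fun x => x) false := by
    apply PySem.List.sorted_eq_sorted_of_perm _ _ _ (fun a b h => h)
    rw [List.perm_ext_iff_of_nodup (PySem.Set.nodup_ofList _) (PySem.Set.nodup_ofList _)]
    intro a
    simp only [PySem.Set.mem_ofList, List.mem_map, PySem.List.mem_sorted]
  have hstep : (fun (lines : List String) (group : String) =>
        let group_labels :=
          PySem.List.sorted
            (PySem.Dict.getD
              ((PySem.Set.ofList labels).foldl
                (fun d label => PySem.Dict.modify d (g label) PySem.Set.empty (fun s => PySem.Set.add s label))
                PySem.Dict.empty) group PySem.Set.empty)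
            (fun x => x) false
        if group_labels.length == 1 && PySem.List.pyGetD group_labels 0 "" == group then
          lines ++ [group]
        else
          lines ++ [PySem.Str.join ": " [group, PySem.Str.join ", " group_labels]])
      = (fun (lines : List String) (group : String) =>
        let members := (PySem.List.sorted (PySem.Set.ofList labels) (fun x => x) false).filter
          (fun l => g l == group)
        if members == [group] then
          lines ++ [group]
        else
          lines ++ [PySem.Str.join ": " [group, PySem.Str.join ", " members]]) := by
    funext lines group
    simp only [hbucket group, pv_sorted_filter (PySem.Set.ofList labels) (fun l => g l == group),
      pv_cond]
  simp only []
  rw [hkeys, hgroups, hstep]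

-- ===== VERDICT (by name: the statement is the Claim_ definition above) =====
theorem build_group_labels_text_spec : Claim_equal_build_group_labels_text := by
  intro labels label_to_group _hdom
  exact pv_main (fun l => PySem.Dict.getD (PySem.Dict.mk label_to_group) l l) labels
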